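-- pv_equiv track=rewrite | github.com/yahya-tamur/advent | python/a2025/02.py | split_interval
-- ===== SOURCE A (Python) =====
-- def split_interval(l, r):
--     ans = []
--     ll = l
--     m = 10 ** len(str(l))
--     for i in range(len(str(l)), len(str(r))):
--         ans.append((ll, m-1))
--         ll = m
--         m = 10*m
--     ans.append((ll, r))
--     return ans
-- ===== SOURCE B (Python) =====
-- def split_interval(l, r):
--     if len(str(l)) >= len(str(r)):
--         return [(l, r)]
--     m = 10 ** len(str(l))
--     return [(l, m - 1)] + split_interval(m, r)
-- ===== Notes on version B (the rewrite author's own statement) =====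
-- stated objective: simpler
-- what changed: Replaces A's loop with running ll/m accumulators plus a trailing append by a direct recursion that peels off the lowest digit-length band (l, 10**len(str(l))-1) and recurses from that power of ten until l and r have equally long string representations.
import Mathlib
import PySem

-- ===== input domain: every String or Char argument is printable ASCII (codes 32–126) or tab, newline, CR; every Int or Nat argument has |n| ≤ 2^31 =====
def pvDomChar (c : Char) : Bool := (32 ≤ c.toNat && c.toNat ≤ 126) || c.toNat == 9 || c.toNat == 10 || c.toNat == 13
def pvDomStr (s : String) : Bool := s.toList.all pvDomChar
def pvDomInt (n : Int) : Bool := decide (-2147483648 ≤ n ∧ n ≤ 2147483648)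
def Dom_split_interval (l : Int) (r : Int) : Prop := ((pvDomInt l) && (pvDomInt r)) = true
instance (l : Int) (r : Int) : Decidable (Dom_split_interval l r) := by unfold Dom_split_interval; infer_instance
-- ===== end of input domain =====

-- B: replaces A's single loop carrying running accumulators ll/m with a direct recursion on the
-- interval: peel off the lowest digit-length band (l, 10**len(str(l)) - 1) and recurse from that
-- power of ten, bottoming out when l and r have equally long string representations.


-- ===== PORT A =====
-- literal port of A: state (ans, ll, m) threaded through the range loop, then a final append.
-- 10 ** len(str(l)): the exponent is a string length, hence ≥ 0, so `.toNat` is exact.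
def split_interval (l : Int) (r : Int) : List (Int × Int) :=
  let ans : List (Int × Int) := []
  let ll : Int := l
  let m : Int := 10 ^ (PySem.Str.len (PySem.Int.toStr l)).toNat
  let s := (PySem.List.pyRange (PySem.Str.len (PySem.Int.toStr l))
              (PySem.Str.len (PySem.Int.toStr r)) 1).foldl
    (fun (st : List (Int × Int) × Int × Int) _ =>
      (st.1 ++ [(st.2.1, st.2.2 - 1)], st.2.2, 10 * st.2.2)) (ans, ll, m)
  s.1 ++ [(s.2.1, r)]

-- ===== PORT B =====
-- termination facts for the recursive port B (cited by its decreasing_by):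
-- str(10^e) has exactly e+1 characters, and string lengths are nonnegative.
lemma pvLen_nonneg (s : String) : 0 ≤ PySem.Str.len s := by
  simp [PySem.Str.len_eq]

-- fuel irrelevance for Nat.toDigitsCore (any fuel > n computes the same characters)
lemma pvTdcFuel : ∀ (n : Nat), ∀ (f : Nat) (l : List Char), n < f →
    Nat.toDigitsCore 10 f n l = Nat.toDigitsCore 10 (n + 1) n l := by
  intro n
  induction n using Nat.strong_induction_on with
  | _ n ih =>
    intro f l hf
    match f, hf with
    | f + 1, hf =>
      by_cases h : n / 10 = 0
      · simp [Nat.toDigitsCore, h]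
      · have hlt : n / 10 < n := Nat.div_lt_self (Nat.pos_of_ne_zero (by
          intro h0; exact h (by simp [h0]))) (by norm_num)
        simp only [Nat.toDigitsCore, h, if_false]
        rw [ih (n / 10) hlt f _ (by omega), ih (n / 10) hlt n _ (by omega)]

lemma pvToDigitsPow10 (e : Nat) : (Nat.toDigits 10 (10 ^ e)).length = e + 1 := by
  induction e with
  | zero => rfl
  | succ e ih =>
    have hdiv : 10 ^ (e + 1) / 10 = 10 ^ e := by
      rw [pow_succ]; exact Nat.mul_div_cancel _ (by norm_num)
    have hne : 10 ^ (e + 1) / 10 ≠ 0 := by rw [hdiv]; positivity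
    have hmod : 10 ^ (e + 1) % 10 = 0 := by
      rw [pow_succ]; exact Nat.mul_mod_left _ _
    show (Nat.toDigitsCore 10 (10 ^ (e + 1) + 1) (10 ^ (e + 1)) []).length = e + 2
    rw [show Nat.toDigitsCore 10 (10 ^ (e + 1) + 1) (10 ^ (e + 1)) [] =
        Nat.toDigitsCore 10 (10 ^ (e + 1)) (10 ^ (e + 1) / 10)
          [Nat.digitChar (10 ^ (e + 1) % 10)] by
      simp [Nat.toDigitsCore, hne]]
    rw [hmod, hdiv, pvTdcFuel (10 ^ e) (10 ^ (e + 1)) _ (by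
      calc 10 ^ e < 10 ^ e * 10 := by nlinarith [Nat.one_le_two_pow (n := e), pow_pos (show 0 < 10 by norm_num) e]
      _ = 10 ^ (e + 1) := (pow_succ 10 e).symm)]
    rw [Nat.toDigitsCore_lens_eq]
    exact congrArg (· + 1) ih

lemma pvLenPow10 (e : Nat) :
    PySem.Str.len (PySem.Int.toStr ((10 : Int) ^ e)) = (e : Int) + 1 := by
  have hnn : ¬ ((10 : Int) ^ e < 0) := not_lt.mpr (by positivity)
  have ht : ((10 : Int) ^ e).toNat = 10 ^ e := by
    rw [show ((10 : Int) ^ e) = ((10 ^ e : Nat) : Int) by push_cast; ring]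
    exact Int.toNat_natCast _
  simp only [PySem.Str.len_eq, PySem.Int.toList_toStr, PySem.Int.toChars, hnn, if_false, ht]
  rw [pvToDigitsPow10]; push_cast; ring

-- literal port of Source B: recursion peeling off the first band; the measure is the
-- digit-length gap, which shrinks because str(10^e) has e+1 characters (pvLenPow10).
def split_interval_alt (l : Int) (r : Int) : List (Int × Int) :=
  if PySem.Str.len (PySem.Int.toStr r) ≤ PySem.Str.len (PySem.Int.toStr l) then [(l, r)]
  else
    [(l, (10 : Int) ^ (PySem.Str.len (PySem.Int.toStr l)).toNat - 1)] ++
      split_interval_alt ((10 : Int) ^ (PySem.Str.len (PySem.Int.toStr l)).toNat) r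
termination_by (PySem.Str.len (PySem.Int.toStr r) - PySem.Str.len (PySem.Int.toStr l)).toNat
decreasing_by
  have h1 := pvLenPow10 (PySem.Str.len (PySem.Int.toStr l)).toNat
  have h0 := pvLen_nonneg (PySem.Int.toStr l)
  rw [h1]
  omega

-- ===== PRECONDITION & SPEC =====
def Spec_split_interval (l : Int) (r : Int) (out : List (Int × Int)) : Prop := out = split_interval_alt l r
instance (l : Int) (r : Int) (out : List (Int × Int)) : Decidable (Spec_split_interval l r out) := by unfold Spec_split_interval; infer_instance

-- ===== CLAIM (what is proved, stated in full; the proofs are below) =====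
def Claim_equal_split_interval : Prop := ∀ (l : Int) (r : Int), Dom_split_interval l r → Spec_split_interval l r (split_interval l r)

-- ===== LEMMAS AND PROOFS =====

-- A's loop body ignores the loop variable: one step of the state machine.
def pvStep (st : List (Int × Int) × Int × Int) : List (Int × Int) × Int × Int :=
  (st.1 ++ [(st.2.1, st.2.2 - 1)], st.2.2, 10 * st.2.2)

lemma pvFoldl_eq_iterate (xs : List Int) (st : List (Int × Int) × Int × Int) :
    xs.foldl (fun (st : List (Int × Int) × Int × Int) _ =>
      (st.1 ++ [(st.2.1, st.2.2 - 1)], st.2.2, 10 * st.2.2)) st = pvStep^[xs.length] st := by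
  induction xs generalizing st with
  | nil => rfl
  | cons x xs ih => simpa [Function.iterate_succ_apply, pvStep] using ih (pvStep st)

-- accumulator generalization for iterates of pvStep
lemma pvIterate_acc (k : Nat) (ans : List (Int × Int)) (x m : Int) :
    pvStep^[k] (ans, x, m) = (ans ++ (pvStep^[k] ([], x, m)).1, (pvStep^[k] ([], x, m)).2) := by
  induction k generalizing ans x m with
  | zero => simp
  | succ k ih =>
      rw [Function.iterate_succ_apply, Function.iterate_succ_apply]
      simp only [pvStep, List.nil_append]
      rw [ih, ih [(x, m - 1)]]
      simp

-- the assembled A-result after k iterations, in closed form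
lemma pvMain (k : Nat) (x m r : Int) :
    (pvStep^[k] ([], x, m)).1 ++ [((pvStep^[k] ([], x, m)).2.1, r)] =
      (List.range (k + 1)).map (fun j =>
        (if j = 0 then x else m * 10 ^ (j - 1), if j = k then r else m * 10 ^ j - 1)) := by
  induction k generalizing x m with
  | zero => simp
  | succ k ih =>
      rw [Function.iterate_succ_apply]
      have hstep : pvStep ([], x, m) = ([(x, m - 1)], m, 10 * m) := rfl
      rw [hstep, pvIterate_acc, List.range_succ_eq_map]
      simp only [List.map_cons, List.cons_append, List.nil_append]
      congr 1
      · norm_num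
      · rw [ih m (10 * m), List.map_map]
        apply List.map_congr_left
        intro j _
        simp only [Function.comp_apply, Prod.mk.injEq]
        refine ⟨?_, ?_⟩
        · rcases Nat.eq_zero_or_pos j with h0 | h0
          · subst h0; simp
          · obtain ⟨t, rfl⟩ := Nat.exists_eq_succ_of_ne_zero (Nat.pos_iff_ne_zero.mp h0)
            rw [if_neg (by omega), if_neg (by omega)]
            simp [pow_succ]; ring
        · by_cases hk : j = k
          · simp [hk]
          · rw [if_neg hk, if_neg (by omega), Nat.succ_eq_add_one, pow_succ]; ring

-- B's recursion, unrolled to the same closed form (induction on the digit-length gap)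
lemma pvAlt_closed : ∀ (k : Nat) (l r : Int),
    k = (PySem.Str.len (PySem.Int.toStr r) - PySem.Str.len (PySem.Int.toStr l)).toNat →
    split_interval_alt l r =
      (List.range (k + 1)).map (fun j =>
        (if j = 0 then l else 10 ^ (PySem.Str.len (PySem.Int.toStr l)).toNat * 10 ^ (j - 1),
         if j = k then r else 10 ^ (PySem.Str.len (PySem.Int.toStr l)).toNat * 10 ^ j - 1)) := by
  intro k
  induction k with
  | zero =>
      intro l r hk
      have hle : PySem.Str.len (PySem.Int.toStr r) ≤ PySem.Str.len (PySem.Int.toStr l) := by omega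
      rw [split_interval_alt, if_pos hle]
      simp
  | succ k ih =>
      intro l r hk
      have hlt : ¬ (PySem.Str.len (PySem.Int.toStr r) ≤ PySem.Str.len (PySem.Int.toStr l)) := by
        omega
      set a : Int := PySem.Str.len (PySem.Int.toStr l) with ha
      have ha0 : 0 ≤ a := pvLen_nonneg _
      have hlenm := pvLenPow10 a.toNat
      rw [split_interval_alt, if_neg hlt]
      rw [ih ((10 : Int) ^ a.toNat) r (by rw [hlenm]; omega)]
      conv_rhs => rw [List.range_succ_eq_map]
      simp only [List.map_cons, List.map_map, List.cons_append, List.nil_append]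
      congr 1
      · simp [ha, PySem.Str.len_eq, PySem.Int.toList_toStr]
      · apply List.map_congr_left
        intro j hj
        simp only [Function.comp_apply, Prod.mk.injEq, hlenm]
        have htn : (((a.toNat : Int)) + 1).toNat = a.toNat + 1 := by omega
        refine ⟨?_, ?_⟩
        · rcases Nat.eq_zero_or_pos j with h0 | h0
          · subst h0
            rw [if_pos rfl, if_neg (by omega)]
            simp
          · obtain ⟨t, rfl⟩ := Nat.exists_eq_succ_of_ne_zero (Nat.pos_iff_ne_zero.mp h0)
            rw [if_neg (by omega), if_neg (by omega), htn]
            simp only [Nat.succ_eq_add_one, Nat.add_sub_cancel]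
            rw [pow_succ, pow_succ]; ring
        · by_cases hjk : j = k
          · rw [if_pos hjk, if_pos (by omega)]
          · rw [if_neg hjk, if_neg (by omega), htn]
            simp only [Nat.succ_eq_add_one]
            rw [pow_succ, pow_succ]; ring

-- ===== VERDICT (by name: the statement is the Claim_ definition above) =====
theorem split_interval_spec : Claim_equal_split_interval := by
  intro l r _
  unfold Spec_split_interval split_interval
  set a : Int := PySem.Str.len (PySem.Int.toStr l) with ha
  set b : Int := PySem.Str.len (PySem.Int.toStr r) with hb
  simp only []
  rw [pvFoldl_eq_iterate, PySem.List.length_pyRange_one]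
  rw [pvMain ((b - a).toNat) l (10 ^ a.toNat) r]
  rw [pvAlt_closed ((b - a).toNat) l r rfl]
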